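-- pv_equiv track=rewrite | github.com/levs16/hw2609 | all.py | func
-- ===== SOURCE A (Python) =====
-- def func(start, target, seen=None):
--     if seen is None:
--         seen = set()
--     if start >= target:
--         return 0
--     if start % 2 == 0:
--         seen.add(start)
--     func(start + 3, target, seen)
--     func(start * 3, target, seen)
--     return len(seen)
-- ===== SOURCE B (Python) =====
-- def func(start, target, seen=None):
--     # Closed-form count: the values reachable from start via +3 / *3 (start >= 1)
--     # are the two arithmetic progressions {start+3k} and {3*start+3k}; count their
--     # even members below target arithmetically and union with the initial seen set.
--     # (A mutates the caller's seen set in place; B does not - return value only.)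
--     if start >= target:
--         return 0
--     base = set() if seen is None else seen
--
--     def chain_evens(a):
--         # even values in {a, a+3, a+6, ...} that are < target
--         if a >= target:
--             return 0
--         terms = (target - a + 2) // 3
--         return (terms + 1) // 2 if a % 2 == 0 else terms // 2
--
--     reach = chain_evens(start)
--     if start % 3 != 0:
--         reach += chain_evens(3 * start)
--
--     def reachable_even(v):
--         return v % 2 == 0 and v < target and (
--             (v >= start and (v - start) % 3 == 0)
--             or (v >= 3 * start and v % 3 == 0))
--
--     return len(base) + reach - sum(1 for v in base if reachable_even(v))
-- ===== Notes on version B (the rewrite author's own statement) =====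
-- stated objective: alternative
-- what changed: B replaces A's branching recursive enumeration of all +3/*3 derivation paths by a closed-form arithmetic count: for start>=1 the reachable values are exactly the two arithmetic progressions {start+3k} and {3*start+3k}, so the even ones below target are counted by a formula and merged with the initial seen set in one linear scan.
import Mathlib
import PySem

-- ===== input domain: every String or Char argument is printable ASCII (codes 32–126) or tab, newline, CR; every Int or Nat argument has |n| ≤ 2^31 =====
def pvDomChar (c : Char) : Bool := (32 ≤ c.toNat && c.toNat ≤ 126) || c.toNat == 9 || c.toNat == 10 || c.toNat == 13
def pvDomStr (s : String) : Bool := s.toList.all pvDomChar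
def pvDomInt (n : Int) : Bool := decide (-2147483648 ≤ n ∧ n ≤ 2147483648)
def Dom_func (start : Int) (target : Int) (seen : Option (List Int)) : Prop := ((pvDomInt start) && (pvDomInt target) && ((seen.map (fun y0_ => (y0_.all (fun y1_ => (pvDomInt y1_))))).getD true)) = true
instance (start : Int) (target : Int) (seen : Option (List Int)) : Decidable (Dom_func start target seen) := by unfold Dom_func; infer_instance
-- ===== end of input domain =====

-- B replaces A's branching recursive path enumeration by a closed-form count over the two
-- arithmetic progressions {start+3k} and {3*start+3k} (objective: alternative algorithm;
-- A mutates the caller's seen set in place, B does not — the equivalence proved here is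
-- about the return value only).


-- ===== PORT A =====
-- one unit of fuel per recursive call; for start ≥ 1 the measure (t - s) shrinks by at least 2
-- at each recursive call, so fuel (target-start).toNat+1 is never exhausted (see funcAGo_spec)
def funcAGo : Nat → Int → Int → PySem.Set Int → PySem.Set Int
  | 0, _, _, seen => seen
  | fuel+1, s, t, seen =>
    if s ≥ t then seen
    else
      let seen1 : PySem.Set Int := if PySem.Int.mod s 2 = 0 then PySem.Set.add seen s else seen
      let seen2 := funcAGo fuel (s + 3) t seen1
      funcAGo fuel (s * 3) t seen2

def func (start : Int) (target : Int) (seen : Option (List Int)) : Int :=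
  let seen0 : PySem.Set Int := match seen with
    | none => PySem.Set.empty
    | some l => PySem.Set.ofList l
  if start ≥ target then 0
  else PySem.List.len (funcAGo ((target - start).toNat + 1) start target seen0)

-- ===== PORT B =====
def chainEvens (target : Int) (a : Int) : Int :=
  if a ≥ target then 0
  else
    let terms := PySem.Int.floordiv (target - a + 2) 3
    if PySem.Int.mod a 2 = 0 then PySem.Int.floordiv (terms + 1) 2
    else PySem.Int.floordiv terms 2

def reachableEven (start : Int) (target : Int) (v : Int) : Bool :=
  decide (PySem.Int.mod v 2 = 0) && decide (v < target) &&
    ((decide (start ≤ v) && decide (PySem.Int.mod (v - start) 3 = 0)) ||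
     (decide (3 * start ≤ v) && decide (PySem.Int.mod v 3 = 0)))

def func_alt (start : Int) (target : Int) (seen : Option (List Int)) : Int :=
  if start ≥ target then 0
  else
    let base : PySem.Set Int := match seen with
      | none => PySem.Set.empty
      | some l => PySem.Set.ofList l
    let reach := chainEvens target start +
      (if PySem.Int.mod start 3 ≠ 0 then chainEvens target (3 * start) else 0)
    PySem.List.len base + reach - ((base.countP (reachableEven start target) : Nat) : Int)

-- ===== PRECONDITION & SPEC =====
-- Pre_ excludes exactly the inputs where the Python A raises: for start ≤ 0 < target the *3
-- branch keeps start at or below 0 forever, so the recursion never reaches target and Python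
-- raises RecursionError; on every other input A returns normally.
def Pre_func (start : Int) (target : Int) (seen : Option (List Int)) : Prop :=
  target ≤ start ∨ 1 ≤ start
instance (start : Int) (target : Int) (seen : Option (List Int)) : Decidable (Pre_func start target seen) := by unfold Pre_func; infer_instance

def pvWitness_func : Int × Int × Option (List Int) := (2, 20, some [4, 7])

def Spec_func (start : Int) (target : Int) (seen : Option (List Int)) (out : Int) : Prop := out = func_alt start target seen
instance (start : Int) (target : Int) (seen : Option (List Int)) (out : Int) : Decidable (Spec_func start target seen out) := by unfold Spec_func; infer_instance

-- ===== CLAIM (what is proved, stated in full; the proofs are below) =====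
def Claim_equal_func : Prop := ∀ (start : Int) (target : Int) (seen : Option (List Int)), Dom_func start target seen → Pre_func start target seen → Spec_func start target seen (func start target seen)

-- ===== LEMMAS AND PROOFS =====

-- the characterisation of A's final seen-set: v is an even value below t lying on one of the
-- two arithmetic progressions of values reachable from s via +3 / *3 (valid for 1 ≤ s)
def inE (s t v : Int) : Prop :=
  v % 2 = 0 ∧ v < t ∧ ((s ≤ v ∧ (v - s) % 3 = 0) ∨ (3 * s ≤ v ∧ v % 3 = 0))

lemma reachableEven_iff (s t v : Int) : reachableEven s t v = true ↔ inE s t v := by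
  simp [reachableEven, inE]
  tauto

lemma inE_empty (s t v : Int) (h1 : 1 ≤ s) (hts : t ≤ s) : ¬ inE s t v := by
  unfold inE; omega

lemma inE_step (s t v : Int) (h1 : 1 ≤ s) (hst : s < t) :
    inE s t v ↔ ((s % 2 = 0 ∧ v = s) ∨ inE (s + 3) t v ∨ inE (s * 3) t v) := by
  unfold inE; omega

lemma funcAGo_spec (fuel : Nat) : ∀ (s t : Int) (seen : PySem.Set Int),
    1 ≤ s → (t - s).toNat < fuel → seen.Nodup →
    (funcAGo fuel s t seen).Nodup ∧
      ∀ v, v ∈ funcAGo fuel s t seen ↔ (v ∈ seen ∨ inE s t v) := by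
  induction fuel with
  | zero => intro s t seen h1 hf hn; omega
  | succ f ih =>
    intro s t seen h1 hf hn
    by_cases hst : s ≥ t
    · rw [funcAGo, if_pos hst]
      exact ⟨hn, fun v => by have := inE_empty s t v h1 hst; tauto⟩
    · rw [funcAGo, if_neg hst]
      have hmod : PySem.Int.mod s 2 = s % 2 := PySem.Int.mod_eq_emod_of_pos (by omega)
      have hn1 : (if PySem.Int.mod s 2 = 0 then PySem.Set.add seen s else seen).Nodup := by
        split
        · exact PySem.Set.nodup_add _ _ hn
        · exact hn
      have hm1 : ∀ v, v ∈ (if PySem.Int.mod s 2 = 0 then PySem.Set.add seen s else seen) ↔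
          (v ∈ seen ∨ (s % 2 = 0 ∧ v = s)) := by
        intro v
        rw [hmod]
        by_cases h2 : s % 2 = 0
        · simp [h2, PySem.Set.mem_add]
        · simp [h2]
      have h2 := ih (s + 3) t _ (by omega) (by omega) hn1
      have h3 := ih (s * 3) t _ (by omega) (by omega) h2.1
      refine ⟨h3.1, fun v => ?_⟩
      rw [h3.2, h2.2, hm1, inE_step s t v h1 (by omega)]
      tauto

def apList (a t : Int) : List Int :=
  (List.range (((t - a).toNat + 2) / 3)).map (fun (i : Nat) => a + 3 * (i : Int))

def evList (a t : Int) : List Int := (apList a t).filter (fun v => decide (v % 2 = 0))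

def canonE (s t : Int) : List Int :=
  evList s t ++ (if s % 3 = 0 then [] else evList (3 * s) t)

lemma mem_apList (a t v : Int) : v ∈ apList a t ↔ a ≤ v ∧ v < t ∧ (v - a) % 3 = 0 := by
  simp only [apList, List.mem_map, List.mem_range]
  constructor
  · rintro ⟨i, hi, rfl⟩; omega
  · rintro ⟨h1, h2, h3⟩
    exact ⟨(v - a).toNat / 3, by omega, by omega⟩

lemma nodup_apList (a t : Int) : (apList a t).Nodup := by
  exact List.Nodup.map (fun i j h => by omega) List.nodup_range

lemma mem_evList (a t v : Int) : v ∈ evList a t ↔ (a ≤ v ∧ v < t ∧ (v - a) % 3 = 0) ∧ v % 2 = 0 := by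
  simp [evList, List.mem_filter, mem_apList]

lemma nodup_evList (a t : Int) : (evList a t).Nodup := (nodup_apList a t).filter _

lemma filter_even_range_map (a : Int) (n : Nat) :
    (((List.range n).map (fun (i : Nat) => a + 3 * (i : Int))).filter (fun v => decide (v % 2 = 0))).length
      = if a % 2 = 0 then (n + 1) / 2 else n / 2 := by
  induction n with
  | zero => simp
  | succ n ih =>
    rw [List.range_succ, List.map_append, List.filter_append, List.length_append, ih]
    have hsing : (List.filter (fun v => decide (v % 2 = 0)) (List.map (fun (i : Nat) => a + 3 * (i : Int)) [n])).length
        = if (a + 3 * (n : Int)) % 2 = 0 then 1 else 0 := by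
      by_cases hp : (a + 3 * (n : Int)) % 2 = 0
      · have hd : (2 : Int) ∣ (a + 3 * (n : Int)) := Int.dvd_of_emod_eq_zero hp
        simp [hp, hd]
      · have hd : ¬ (2 : Int) ∣ (a + 3 * (n : Int)) := by omega
        simp [hp, hd]
    rw [hsing]
    split_ifs <;> omega

lemma length_evList (a t : Int) : ((evList a t).length : Int) = chainEvens t a := by
  unfold evList apList chainEvens
  rw [filter_even_range_map]
  by_cases hat : a ≥ t
  · have : (t - a).toNat = 0 := by omega
    simp [hat, this]
  · have hterms : PySem.Int.floordiv (t - a + 2) 3 = (((t - a).toNat + 2) / 3 : Nat) := by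
      rw [PySem.Int.floordiv_eq_ediv_of_pos (by omega)]
      omega
    have hmod : PySem.Int.mod a 2 = a % 2 := PySem.Int.mod_eq_emod_of_pos (by omega)
    simp only [if_neg hat, hterms, hmod]
    by_cases ha : a % 2 = 0
    · rw [if_pos ha, if_pos ha, PySem.Int.floordiv_eq_ediv_of_pos (by omega)]
      omega
    · rw [if_neg ha, if_neg ha, PySem.Int.floordiv_eq_ediv_of_pos (by omega)]
      omega

lemma mem_canonE (s t v : Int) (h1 : 1 ≤ s) : v ∈ canonE s t ↔ inE s t v := by
  unfold canonE inE
  by_cases h3 : s % 3 = 0 <;>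
    simp [h3, List.mem_append, mem_evList] <;> omega

lemma nodup_canonE (s t : Int) (_h1 : 1 ≤ s) : (canonE s t).Nodup := by
  unfold canonE
  by_cases h3 : s % 3 = 0
  · simp [h3, nodup_evList]
  · rw [if_neg h3]
    refine List.Nodup.append (nodup_evList _ _) (nodup_evList _ _) ?_
    intro v hv hv'
    rw [mem_evList] at hv hv'
    omega

lemma length_canonE (s t : Int) :
    ((canonE s t).length : Int)
      = chainEvens t s + (if PySem.Int.mod s 3 ≠ 0 then chainEvens t (3 * s) else 0) := by
  have hmod : PySem.Int.mod s 3 = s % 3 := PySem.Int.mod_eq_emod_of_pos (by omega)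
  unfold canonE
  rw [List.length_append, hmod]
  by_cases h3 : s % 3 = 0
  · simp [h3, length_evList]
  · simp only [ne_eq, h3, not_false_eq_true, if_true]
    push_cast
    rw [length_evList, length_evList]

lemma union_count (L base C : List Int) (p : Int → Bool)
    (hL : L.Nodup) (hb : base.Nodup) (hC : C.Nodup)
    (hmem : ∀ v, v ∈ L ↔ (v ∈ base ∨ v ∈ C))
    (hp : ∀ v, p v = true ↔ v ∈ C) :
    (L.length : Int) = (base.length : Int) + (C.length : Int) - ((base.countP p : Nat) : Int) := by
  have h1 : L.toFinset = base.toFinset ∪ C.toFinset := by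
    ext v; simp [List.mem_toFinset, hmem]
  have hfilter : (base.filter p).toFinset = base.toFinset ∩ C.toFinset := by
    ext v; simp [List.mem_toFinset, hp]
  have hcL : L.toFinset.card = L.length := List.toFinset_card_of_nodup hL
  have hcb : base.toFinset.card = base.length := List.toFinset_card_of_nodup hb
  have hcC : C.toFinset.card = C.length := List.toFinset_card_of_nodup hC
  have hcf : (base.filter p).toFinset.card = (base.filter p).length :=
    List.toFinset_card_of_nodup (hb.filter p)
  have hcount : base.countP p = (base.filter p).length := List.countP_eq_length_filter
  have hui := Finset.card_union_add_card_inter base.toFinset C.toFinset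
  rw [h1] at hcL
  rw [hfilter] at hcf
  omega

-- ===== VERDICT (by name: the statement is the Claim_ definition above) =====
theorem func_spec : Claim_equal_func := by
  have main : ∀ (start target : Int) (base : PySem.Set Int), 1 ≤ start → start < target →
      base.Nodup →
      ((funcAGo ((target - start).toNat + 1) start target base).length : Int)
        = (base.length : Int) +
            (chainEvens target start +
              if PySem.Int.mod start 3 ≠ 0 then chainEvens target (3 * start) else 0) -
          ((base.countP (reachableEven start target) : Nat) : Int) := by
    intro start target base h1 hlt hnb
    obtain ⟨hnL, hmL⟩ := funcAGo_spec ((target - start).toNat + 1) start target base h1 (by omega) hnb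
    rw [union_count _ _ (canonE start target) (reachableEven start target) hnL hnb
        (nodup_canonE start target h1)
        (fun v => by rw [hmL v, mem_canonE start target v h1])
        (fun v => by rw [reachableEven_iff, mem_canonE start target v h1]),
      length_canonE start target]
  intro start target seen hdom hpre
  unfold Spec_func func func_alt
  by_cases hge : start ≥ target
  · simp [hge]
  · have h1 : 1 ≤ start := by
      rcases hpre with h | h
      · omega
      · exact h
    simp only [if_neg hge, PySem.List.len_eq]
    cases seen with
    | none => exact main start target PySem.Set.empty h1 (by omega) List.nodup_nil
    | some l => exact main start target (PySem.Set.ofList l) h1 (by omega) (PySem.Set.nodup_ofList l)
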